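-- pv_equiv track=rewrite | github.com/pypi-data/pypi-mirror-402 | packages/fmake/fmake-0.2.5-py3-none-any.whl/fmake/vhdl_make_implementation.py | make_IPcoreList_in_str
-- ===== SOURCE A (Python) =====
-- def File_get_base_name(FullName,DotIndex = -2):
--     baseName = FullName.replace("\\","/").split("/")[-1].split(".")[DotIndex]
--     return baseName
--
-- def make_IPcoreList_in_str(IPcoreList_in):
--     IPcoreList_in_str =""
--     used_IP = []
--     for x in IPcoreList_in:
--         x1 = File_get_base_name(x,0)
--         if x1 in used_IP:
--             continue
--         used_IP.append(x1)
--         IPcoreList_in_str+= x1 + ".xco = " + x1 + "\n"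
--     return IPcoreList_in_str
-- ===== SOURCE B (Python) =====
-- def File_get_base_name(FullName, DotIndex=-2):
--     baseName = FullName.replace("\\", "/").split("/")[-1].split(".")[DotIndex]
--     return baseName
--
-- def make_IPcoreList_in_str(IPcoreList_in):
--     # head-and-filter dedup: compute all basenames once, then repeatedly emit the
--     # first remaining basename's line and filter its duplicates out of the worklist.
--     rest = [File_get_base_name(x, 0) for x in IPcoreList_in]
--     out = []
--     while rest:
--         b = rest[0]
--         out.append(b + ".xco = " + b + "\n")
--         rest = [y for y in rest[1:] if y != b]
--     return "".join(out)
-- ===== Notes on version B (the rewrite author's own statement) =====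
-- stated objective: alternative
-- what changed: Replaces A's single pass with a per-element seen-list membership check by a head-and-filter scheme: basenames are computed once up front, then each round emits the line for the first remaining basename and filters all its duplicates out of the worklist (no seen set at all), joining the collected lines at the end.
import Mathlib
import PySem

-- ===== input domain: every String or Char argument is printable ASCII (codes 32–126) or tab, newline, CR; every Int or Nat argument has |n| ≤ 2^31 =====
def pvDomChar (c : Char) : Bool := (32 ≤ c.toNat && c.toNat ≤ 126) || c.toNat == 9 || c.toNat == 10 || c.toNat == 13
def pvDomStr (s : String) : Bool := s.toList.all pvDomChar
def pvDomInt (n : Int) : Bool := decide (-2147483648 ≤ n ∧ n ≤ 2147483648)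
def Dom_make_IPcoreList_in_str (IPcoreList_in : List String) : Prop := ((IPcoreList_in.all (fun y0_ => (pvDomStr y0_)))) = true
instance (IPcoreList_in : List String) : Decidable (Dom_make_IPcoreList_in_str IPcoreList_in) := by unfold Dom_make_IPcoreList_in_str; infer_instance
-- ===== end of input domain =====

-- B replaces A's seen-list membership loop by a head-and-filter scheme (emit first basename, filter its duplicates out of the worklist, repeat); alternative decomposition, same result.

-- ===== PORT A =====
-- FullName.replace("\\","/").split("/")[-1].split(".")[DotIndex]
-- str.split with a non-empty separator always yields a non-empty list, so the
-- [-1] and (for the 0 index both ports use) [DotIndex] lookups never raise; the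
-- .getD "" defaults are unreachable on every call the ports make.
def File_get_base_name (FullName : String) (DotIndex : Int) : String :=
  let parts := (PySem.Str.split? (PySem.Str.replace FullName "\\" "/") "/").getD []
  let last := (PySem.List.pyGet? parts (-1)).getD ""
  let pieces := (PySem.Str.split? last ".").getD []
  (PySem.List.pyGet? pieces DotIndex).getD ""

def make_IPcoreList_in_str (IPcoreList_in : List String) : String :=
  (IPcoreList_in.foldl
    (fun (st : String × List String) x =>
      let x1 := File_get_base_name x 0
      if st.2.contains x1 then st
      else (st.1 ++ (x1 ++ ".xco = " ++ x1 ++ "\n"), st.2 ++ [x1]))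
    ("", ([] : List String))).1

-- ===== PORT B =====
-- the 'while rest:' loop of Source B over the precomputed basename worklist;
-- the extra Nat is fuel (≥ the worklist length) making the recursion structural
def pvAltLoop (fuel : Nat) (rest : List String) (out : List String) : List String :=
  match fuel, rest with
  | _, [] => out
  | 0, _ :: _ => out  -- unreachable: fuel ≥ rest.length at every call
  | n + 1, b :: xs =>
    pvAltLoop n (xs.filter (fun y => y ≠ b)) (out ++ [b ++ ".xco = " ++ b ++ "\n"])

def make_IPcoreList_in_str_alt (IPcoreList_in : List String) : String :=
  let rest := IPcoreList_in.map (fun x => File_get_base_name x 0)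
  PySem.Str.join "" (pvAltLoop rest.length rest [])

-- ===== PRECONDITION & SPEC =====
def Spec_make_IPcoreList_in_str (IPcoreList_in : List String) (out : String) : Prop := out = make_IPcoreList_in_str_alt IPcoreList_in
instance (IPcoreList_in : List String) (out : String) : Decidable (Spec_make_IPcoreList_in_str IPcoreList_in out) := by unfold Spec_make_IPcoreList_in_str; infer_instance

-- ===== CLAIM (what is proved, stated in full; the proofs are below) =====
def Claim_equal_make_IPcoreList_in_str : Prop := ∀ (IPcoreList_in : List String), Dom_make_IPcoreList_in_str IPcoreList_in → Spec_make_IPcoreList_in_str IPcoreList_in (make_IPcoreList_in_str IPcoreList_in)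

-- ===== LEMMAS AND PROOFS =====

-- concatenation of a list of strings, the common normal form of both sides
def pvCat (ss : List String) : String :=
  String.ofList (ss.map String.toList).flatten

theorem pvCat_nil : pvCat [] = "" := rfl

theorem pvCat_append (a b : List String) :
    pvCat (a ++ b) = pvCat a ++ pvCat b := by
  simp [pvCat, String.ofList_append]

theorem pvCat_singleton (s : String) : pvCat [s] = s := by
  simp [pvCat]

-- proof-side pure-string form of the head-and-filter recursion (fuelled too)
def pvG (fuel : Nat) (l : List String) : String :=
  match fuel, l with
  | _, [] => ""
  | 0, _ :: _ => ""
  | n + 1, b :: xs =>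
    (b ++ ".xco = " ++ b ++ "\n") ++ pvG n (xs.filter (fun y => y ≠ b))

theorem pvG_congr (m : Nat) : ∀ (n : Nat) (l : List String), l.length ≤ m → l.length ≤ n →
    pvG m l = pvG n l := by
  induction m with
  | zero => intro n l hm _; cases l with
    | nil => cases n <;> rfl
    | cons x xs => simp at hm
  | succ m ih =>
    intro n l hm hn
    cases l with
    | nil => cases n <;> rfl
    | cons x xs =>
      cases n with
      | zero => simp at hn
      | succ n =>
        simp only [pvG]
        congr 1
        exact ih n _ (le_trans (List.length_filter_le _ _) (by simpa using hm))
          (le_trans (List.length_filter_le _ _) (by simpa using hn))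

theorem pv_altLoop_cat (fuel : Nat) : ∀ (rest out : List String), rest.length ≤ fuel →
    pvCat (pvAltLoop fuel rest out) = pvCat out ++ pvG fuel rest := by
  induction fuel with
  | zero => intro rest out h; cases rest with
    | nil => simp [pvAltLoop, pvG]
    | cons x xs => simp at h
  | succ n ih =>
    intro rest out h
    cases rest with
    | nil => simp [pvAltLoop, pvG]
    | cons x xs =>
      simp only [pvAltLoop, pvG]
      rw [ih _ _ (le_trans (List.length_filter_le _ _) (by simpa using h))]
      simp only [pvCat_append, pvCat_singleton, String.append_assoc]

theorem pv_chars_join_nil (pss : List (List Char)) :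
    PySem.Chars.join [] pss = pss.flatten := by
  induction pss with
  | nil => simp [PySem.Chars.join_nil]
  | cons p t ih =>
    cases t with
    | nil => simp [PySem.Chars.join_singleton]
    | cons q t2 =>
      rw [PySem.Chars.join_cons_cons]
      simp [ih]

theorem pv_join_eq_cat (ss : List String) :
    PySem.Str.join "" ss = pvCat ss := by
  simp only [PySem.Str.join, pvCat]
  rw [show ("" : String).toList = [] from rfl, pv_chars_join_nil]

-- pvG with exactly-enough fuel, plus its unfolding lemmas
def pvG' (l : List String) : String := pvG l.length l

theorem pvG'_nil : pvG' [] = "" := rfl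

theorem pvG'_cons (b : String) (xs : List String) :
    pvG' (b :: xs)
      = (b ++ ".xco = " ++ b ++ "\n") ++ pvG' (xs.filter (fun y => y ≠ b)) := by
  simp only [pvG', List.length_cons, pvG]
  congr 1
  exact pvG_congr _ _ _ (List.length_filter_le _ _) (le_refl _)

-- A's loop, with used-list u, equals pvG' of the basename worklist filtered by u
theorem pv_loop_eq (l : List String) (s : String) (u : List String) :
    (l.foldl
      (fun (st : String × List String) x =>
        let x1 := File_get_base_name x 0
        if st.2.contains x1 then st
        else (st.1 ++ (x1 ++ ".xco = " ++ x1 ++ "\n"), st.2 ++ [x1]))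
      (s, u)).1
    = s ++ pvG' ((l.map (fun x => File_get_base_name x 0)).filter (fun y => !(u.contains y))) := by
  induction l generalizing s u with
  | nil => simp [pvG'_nil]
  | cons x xs ih =>
    rw [List.foldl_cons, List.map_cons, List.filter_cons]
    by_cases hm : File_get_base_name x 0 ∈ u
    · have e1 : (let x1 := File_get_base_name x 0;
          if (s, u).2.contains x1 = true then (s, u)
          else ((s, u).1 ++ (x1 ++ ".xco = " ++ x1 ++ "\n"), (s, u).2 ++ [x1])) = (s, u) := by
        simp [hm]
      have hb : (!(u.contains (File_get_base_name x 0))) = false := by simp [hm]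
      rw [e1, hb, if_neg (by simp)]
      exact ih s u
    · have e1 : (let x1 := File_get_base_name x 0;
          if (s, u).2.contains x1 = true then (s, u)
          else ((s, u).1 ++ (x1 ++ ".xco = " ++ x1 ++ "\n"), (s, u).2 ++ [x1]))
          = (s ++ (File_get_base_name x 0 ++ ".xco = " ++ File_get_base_name x 0 ++ "\n"),
             u ++ [File_get_base_name x 0]) := by
        simp [hm]
      have hb : (!(u.contains (File_get_base_name x 0))) = true := by simp [hm]
      rw [e1, hb, if_pos rfl, ih, pvG'_cons, List.filter_filter]
      have hAB : ((xs.map (fun x => File_get_base_name x 0)).filter fun y =>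
            !((u ++ [File_get_base_name x 0]).contains y))
          = ((xs.map (fun x => File_get_base_name x 0)).filter fun y =>
            decide (y ≠ File_get_base_name x 0) && (!(u.contains y))) := by
        apply List.filter_congr
        intro y _
        by_cases hy : y = File_get_base_name x 0
        · simp [hy]
        · simp [hy]
      rw [hAB, String.append_assoc]

-- ===== VERDICT (by name: the statement is the Claim_ definition above) =====
theorem make_IPcoreList_in_str_spec : Claim_equal_make_IPcoreList_in_str := by
  intro l _
  unfold Spec_make_IPcoreList_in_str make_IPcoreList_in_str make_IPcoreList_in_str_alt
  rw [pv_loop_eq l "" []]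
  rw [pv_join_eq_cat, pv_altLoop_cat _ _ [] (le_refl _)]
  simp only [pvCat_nil]
  rw [show ((l.map (fun x => File_get_base_name x 0)).filter
        (fun y => !(([] : List String).contains y))) = l.map (fun x => File_get_base_name x 0) by
        simp]
  rfl
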